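-- pv_equiv track=rewrite | github.com/daxida/wiktextract | wiktextract/extractor/zh/gloss.py | merge_gloss_data
-- ===== SOURCE A (Python) =====
-- from collections import defaultdict
-- from typing import Dict, List, Union
--
-- def merge_gloss_data(
--     data_a: Dict[str, List[str]], data_b: Dict[str, List[str]]
-- ) -> Dict[str, List[str]]:
--     new_data = defaultdict(list)
--     for data in data_a, data_b:
--         for key, value in data.items():
--             new_data[key].extend(value)
--     return new_data
-- ===== SOURCE B (Python) =====
-- from collections import defaultdict
--
--
-- def merge_gloss_data(data_a, data_b):
--     keys = list(data_a) + [k for k in data_b if k not in data_a]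
--     return defaultdict(
--         list, {k: data_a.get(k, []) + data_b.get(k, []) for k in keys}
--     )
-- ===== Notes on version B (the rewrite author's own statement) =====
-- stated objective: simpler
-- what changed: Replaces A's double loop that mutates a defaultdict entry by entry with a one-pass build: compute the merged key order (data_a's keys, then data_b's new keys) and map each key to data_a.get(k, []) + data_b.get(k, []).
import Mathlib
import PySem

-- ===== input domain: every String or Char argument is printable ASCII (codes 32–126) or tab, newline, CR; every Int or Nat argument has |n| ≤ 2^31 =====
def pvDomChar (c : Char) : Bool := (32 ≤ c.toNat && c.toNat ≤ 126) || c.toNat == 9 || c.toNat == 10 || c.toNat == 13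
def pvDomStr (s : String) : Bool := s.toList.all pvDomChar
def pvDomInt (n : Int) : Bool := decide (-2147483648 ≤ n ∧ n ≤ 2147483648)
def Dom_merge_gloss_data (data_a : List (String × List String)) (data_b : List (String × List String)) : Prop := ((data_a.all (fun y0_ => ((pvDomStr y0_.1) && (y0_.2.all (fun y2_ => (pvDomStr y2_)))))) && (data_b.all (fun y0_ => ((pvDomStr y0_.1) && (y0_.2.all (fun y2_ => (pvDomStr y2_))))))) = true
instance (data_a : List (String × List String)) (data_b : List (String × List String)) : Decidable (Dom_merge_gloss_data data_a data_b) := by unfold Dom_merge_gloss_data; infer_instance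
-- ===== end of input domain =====

-- B merges by building the merged key order once and concatenating the two lookups per key,
-- instead of A's mutate-a-defaultdict double loop (objective: simpler/alternative decomposition, same cost).

-- ===== PORT A =====
-- for data in data_a, data_b: for key, value in data.items(): new_data[key].extend(value)
-- (new_data[key] on a defaultdict(list) creates [] at the end if missing; .extend appends value)
def merge_gloss_data (data_a : List (String × List String)) (data_b : List (String × List String)) : List (String × List String) :=
  let step := fun (d : PySem.Dict String (List String)) (p : String × List String) =>
    d.modify p.1 [] (fun v => v ++ p.2)
  let d1 := data_a.foldl step (PySem.Dict.empty)
  let d2 := data_b.foldl step d1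
  d2.items

-- ===== PORT B =====
-- keys = list(data_a) + [k for k in data_b if k not in data_a]
-- return defaultdict(list, {k: data_a.get(k, []) + data_b.get(k, []) for k in keys})
def merge_gloss_data_alt (data_a : List (String × List String)) (data_b : List (String × List String)) : List (String × List String) :=
  let da := PySem.Dict.ofList data_a
  let db := PySem.Dict.ofList data_b
  let keys := da.keys ++ db.keys.filter (fun k => !(da.contains k))
  keys.map (fun k => (k, da.getD k [] ++ db.getD k []))

-- ===== PRECONDITION & SPEC =====
-- Pre_ restricts the association lists to distinct keys within each argument: these are exactly the
-- lists that represent Python dicts (a Python dict can never hold a duplicate key), so no input the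
-- Python A accepts is excluded.
def Pre_merge_gloss_data (data_a : List (String × List String)) (data_b : List (String × List String)) : Prop :=
  (data_a.map Prod.fst).Nodup ∧ (data_b.map Prod.fst).Nodup
instance (data_a : List (String × List String)) (data_b : List (String × List String)) : Decidable (Pre_merge_gloss_data data_a data_b) := by unfold Pre_merge_gloss_data; infer_instance

def pvWitness_merge_gloss_data : (List (String × List String)) × (List (String × List String)) :=
  ([("a", ["x", "y"]), ("b", [])], [("b", ["z"]), ("c", ["w"])])

def Spec_merge_gloss_data (data_a : List (String × List String)) (data_b : List (String × List String)) (out : List (String × List String)) : Prop := out = merge_gloss_data_alt data_a data_b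
instance (data_a : List (String × List String)) (data_b : List (String × List String)) (out : List (String × List String)) : Decidable (Spec_merge_gloss_data data_a data_b out) := by unfold Spec_merge_gloss_data; infer_instance

-- ===== CLAIM (what is proved, stated in full; the proofs are below) =====
def Claim_equal_merge_gloss_data : Prop := ∀ (data_a : List (String × List String)) (data_b : List (String × List String)), Dom_merge_gloss_data data_a data_b → Pre_merge_gloss_data data_a data_b → Spec_merge_gloss_data data_a data_b (merge_gloss_data data_a data_b)

-- ===== LEMMAS AND PROOFS =====

-- Folding `insert` over a list of fresh distinct keys is the identity embedding (`ofList` on Nodup keys).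
theorem mgd_ofList_eq_mk (xs : List (String × List String)) (h : (xs.map Prod.fst).Nodup) :
    PySem.Dict.ofList xs = PySem.Dict.mk xs := by
  apply PySem.Dict.ext
  show (xs.foldl (fun acc p => acc.insert p.1 p.2) PySem.Dict.empty).items = xs
  have h2 := PySem.Dict.items_foldl_insert_fresh (l := xs) (d := (PySem.Dict.empty : PySem.Dict String (List String)))
      (k := Prod.fst) (v := Prod.snd) (by intro a _; simp [PySem.Dict.contains_empty]) h
  exact h2.trans (by simp [PySem.Dict.empty])

-- What A's extend loop does to a dict with Nodup keys, for a batch with Nodup keys: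
-- existing entries get `(mk b).getD key []` appended; fresh entries of b are appended at the end.
theorem mgd_fold_items (b : List (String × List String)) :
    ∀ (D : PySem.Dict String (List String)), D.keys.Nodup → (b.map Prod.fst).Nodup →
    (b.foldl (fun d p => d.modify p.1 [] (fun v => v ++ p.2)) D).items =
      D.items.map (fun p => (p.1, p.2 ++ (PySem.Dict.mk b).getD p.1 [])) ++
      (b.filter (fun p => !(D.contains p.1))).map (fun p => (p.1, [] ++ p.2)) := by
  induction b with
  | nil =>
    intro D _ _
    simp [PySem.Dict.getD, PySem.Dict.get?]
  | cons hd tl ih =>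
    intro D hD hb
    obtain ⟨k, v⟩ := hd
    simp only [List.map_cons, List.nodup_cons] at hb
    obtain ⟨hk_tl, htl⟩ := hb
    have hstep : (D.modify k [] (fun v0 => v0 ++ v)) = D.insert k (D.getD k [] ++ v) := rfl
    have hnodup' : (D.insert k (D.getD k [] ++ v)).keys.Nodup := PySem.Dict.nodup_keys_insert D _ _ hD
    rw [List.foldl_cons, hstep, ih _ hnodup' htl]
    -- the filter over tl is the same for D and for D.insert … (k never occurs in tl)
    have hfilter : tl.filter (fun p => !((D.insert k (D.getD k [] ++ v)).contains p.1)) =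
        tl.filter (fun p => !(D.contains p.1)) := by
      apply List.filter_congr
      intro p hp
      have hne : (p.1 == k) = false := by
        simp only [beq_eq_false_iff_ne, ne_eq]
        intro hpk
        exact hk_tl (hpk ▸ List.mem_map_of_mem hp)
      rw [PySem.Dict.contains_insert, hne, Bool.false_or]
    -- getD of the cons'd dict
    have hgetD_cons : ∀ x, (PySem.Dict.mk ((k, v) :: tl)).getD x [] =
        if (k == x) then v else (PySem.Dict.mk tl).getD x [] := by
      intro x
      simp only [PySem.Dict.getD, PySem.Dict.get?_mk_cons]
      split <;> rfl
    have hgetD_tl_k : (PySem.Dict.mk tl).getD k [] = [] := by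
      apply PySem.Dict.getD_of_not_contains
      simp only [PySem.Dict.contains]
      rw [List.any_eq_false]
      intro p hp
      simp only [Bool.not_eq_true, beq_eq_false_iff_ne, ne_eq]
      intro hpk
      exact hk_tl (hpk ▸ List.mem_map_of_mem hp)
    by_cases hc : D.contains k = true
    · rw [PySem.Dict.items_insert_of_contains _ _ hc, hfilter]
      have hfilter2 : ((k, v) :: tl).filter (fun p => !(D.contains p.1)) =
          tl.filter (fun p => !(D.contains p.1)) := by
        simp [hc]
      rw [hfilter2, List.map_map]
      congr 1
      apply List.map_congr_left
      intro p hp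
      obtain ⟨p1, p2⟩ := p
      by_cases hpk : p1 = k
      · subst hpk
        have hval : D.getD p1 [] = p2 := PySem.Dict.getD_of_mem_items D hp hD []
        simp [Function.comp, hgetD_cons, hgetD_tl_k, hval]
      · have hne : (p1 == k) = false := by simp [hpk]
        have hne' : (k == p1) = false := by simp [Ne.symm hpk]
        simp [Function.comp, hne, hgetD_cons, hne']
    · have hc' : D.contains k = false := by simp_all
      rw [PySem.Dict.items_insert_of_not_contains _ _ hc', hfilter]
      have hgDk : D.getD k [] = [] := PySem.Dict.getD_of_not_contains D [] hc'
      have hfilter2 : ((k, v) :: tl).filter (fun p => !(D.contains p.1)) =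
          (k, v) :: tl.filter (fun p => !(D.contains p.1)) := by
        simp [hc']
      rw [hfilter2, List.map_append, List.map_cons]
      have hmap : D.items.map (fun p => (p.1, p.2 ++ (PySem.Dict.mk tl).getD p.1 [])) =
          D.items.map (fun p => (p.1, p.2 ++ (PySem.Dict.mk ((k, v) :: tl)).getD p.1 [])) := by
        apply List.map_congr_left
        intro p hp
        have hpk : (k == p.1) = false := by
          simp only [beq_eq_false_iff_ne, ne_eq]
          intro hkp
          have hmem : D.contains p.1 = true := by
            simp only [PySem.Dict.contains]
            rw [List.any_eq_true]
            exact ⟨p, hp, by simp⟩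
          rw [← hkp] at hmem
          simp [hc'] at hmem
        rw [hgetD_cons, hpk]
        simp
      rw [hmap]
      simp [hgDk, hgetD_tl_k]

-- ===== VERDICT (by name: the statement is the Claim_ definition above) =====
theorem merge_gloss_data_spec : Claim_equal_merge_gloss_data := by
  intro a b _ hpre
  obtain ⟨ha, hb⟩ := hpre
  show merge_gloss_data a b = merge_gloss_data_alt a b
  -- first fold: from the empty dict, A's loop just embeds a
  have hD1 : a.foldl (fun d p => d.modify p.1 [] (fun v => v ++ p.2)) PySem.Dict.empty =
      PySem.Dict.mk (a.map (fun p => (p.1, ([] : List String) ++ p.2))) := by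
    apply PySem.Dict.ext
    rw [mgd_fold_items a PySem.Dict.empty (by simp [PySem.Dict.keys_empty]) ha]
    simp [PySem.Dict.empty]
  have hkeysD1 : (PySem.Dict.mk (a.map (fun p => (p.1, ([] : List String) ++ p.2)))).keys.Nodup := by
    simpa [PySem.Dict.keys, Function.comp] using ha
  -- second fold over b, then compare with B's one-pass build
  unfold merge_gloss_data merge_gloss_data_alt
  simp only []
  rw [hD1, mgd_fold_items b _ hkeysD1 hb,
      mgd_ofList_eq_mk a ha, mgd_ofList_eq_mk b hb]
  -- first halves: entries of a
  simp only [List.map_append, List.map_map]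
  congr 1
  · simp only [PySem.Dict.keys, List.map_map]
    apply List.map_congr_left
    intro p hp
    have hget_a : (PySem.Dict.mk a).getD p.1 [] = p.2 :=
      PySem.Dict.getD_of_mem_items _ (by exact hp) (by simpa [PySem.Dict.keys] using ha) []
    simp [Function.comp, hget_a]
  -- second halves: fresh entries of b
  · have hcontains : ∀ x, (PySem.Dict.mk (a.map (fun p => (p.1, ([] : List String) ++ p.2)))).contains x =
        (PySem.Dict.mk a).contains x := by
      intro x
      simp [PySem.Dict.contains]
    have hfm : ((PySem.Dict.mk b).keys.filter (fun k => !((PySem.Dict.mk a).contains k))) =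
        (b.filter (fun p => !((PySem.Dict.mk a).contains p.1))).map Prod.fst := by
      simp only [PySem.Dict.keys, List.filter_map]
      rfl
    have hfc : b.filter (fun p => !((PySem.Dict.mk (a.map (fun p => (p.1, ([] : List String) ++ p.2)))).contains p.1)) =
        b.filter (fun p => !((PySem.Dict.mk a).contains p.1)) := by
      apply List.filter_congr; intro p _; rw [hcontains]
    rw [hfc, hfm, List.map_map]
    apply List.map_congr_left
    intro p hp
    have hp' := List.of_mem_filter hp
    have hpb := List.mem_of_mem_filter hp
    have hget_a : (PySem.Dict.mk a).getD p.1 [] = [] := by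
      apply PySem.Dict.getD_of_not_contains
      simpa using hp'
    have hget_b : (PySem.Dict.mk b).getD p.1 [] = p.2 :=
      PySem.Dict.getD_of_mem_items _ (by exact hpb) (by simpa [PySem.Dict.keys] using hb) []
    simp [Function.comp, hget_a, hget_b]
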